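-- pv_equiv track=rewrite | github.com/hyeonhe/algo | a.py | solution
-- ===== SOURCE A (Python) =====
-- def solution(new_id):
--     answer = ''
--
--
-- #     1단계
--     new_id = new_id.lower()
--
-- #     2단계
--     for i in new_id:
--         if i.isalnum() or i in '-_.':
--             answer += i
--
-- #     3단계
--     answer = list(answer)
--     cnt = 0
--     for i in range(len(answer)):
--         if answer[i] == '.' and cnt == 0:
--             cnt += 1
--         elif answer[i] == '.':
--             answer[i] = ' '
--         else:
--             cnt = 0
--
-- #     4단계
--     if len(answer) > 0 and answer[0] == '.':
--         answer.remove(answer[0])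
--     if len(answer) > 0 and answer[-1] == '.':
--         answer = answer[:-1]
--     answer = "".join(answer)
--     answer = answer.replace(" ", "")
--
-- #     5단계
--     if answer == '':
--         answer = 'a'
--
-- #     6단계
--     if len(answer) >= 16:
--         answer = answer[:15]
--
--     if len(answer) > 0 and answer[-1] == '.':
--         answer = answer[:-1]
--
-- #     7단계
--     if len(answer) <= 2:
--         while len(answer) < 3:
--             answer += answer[-1]
--
--     return answer
-- ===== SOURCE B (Python) =====
-- import re
--
-- def solution(new_id):
--     # regex pipeline instead of A's explicit loops / dot state machine
--     s = new_id.lower()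
--     s = re.sub(r'[^a-z0-9\-_.]', '', s)
--     s = re.sub(r'\.+', '.', s)
--     s = re.sub(r'^\.|\.$', '', s)
--     if s == '':
--         s = 'a'
--     s = s[:15]
--     if s[-1] == '.':
--         s = s[:-1]
--     if len(s) < 3:
--         s = s + s[-1] * (3 - len(s))
--     return s
-- ===== Notes on version B (the rewrite author's own statement) =====
-- stated objective: idiomatic
-- what changed: A's character-accumulation loop, counter-based dot-to-space marking pass and space-removal are replaced by a regex substitution pipeline (drop disallowed chars, collapse dot runs, strip end dots) followed by the same truncate/strip/pad tail.
import Mathlib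
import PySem

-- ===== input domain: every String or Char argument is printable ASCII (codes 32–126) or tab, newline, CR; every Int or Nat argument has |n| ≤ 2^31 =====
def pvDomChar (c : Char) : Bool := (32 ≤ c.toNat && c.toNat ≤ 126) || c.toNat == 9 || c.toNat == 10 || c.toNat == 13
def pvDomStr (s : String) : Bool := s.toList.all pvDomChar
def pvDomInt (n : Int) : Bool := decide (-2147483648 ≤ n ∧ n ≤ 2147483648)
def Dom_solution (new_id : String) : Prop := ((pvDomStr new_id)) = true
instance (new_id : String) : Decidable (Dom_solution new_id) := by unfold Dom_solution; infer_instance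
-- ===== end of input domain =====

-- B replaces A's explicit accumulation loop and counter-based dot state machine by a
-- regex-substitution pipeline (filter / collapse dot runs / strip end dots); same results, simpler.


-- ===== PORT A =====
-- `i.isalnum() or i in '-_.'`
def aKeep (c : Char) : Bool := PySem.Chars.isalnum c || (c == '-' || c == '_' || c == '.')

-- step 3: the Python loop writes answer[i] in place reading only answer[i] and cnt,
-- so it is exactly this stateful map carrying cnt.
def aMark : List Char → Nat → List Char
  | [], _ => []
  | c :: t, cnt =>
    if c = '.' ∧ cnt = 0 then '.' :: aMark t (cnt + 1)
    else if c = '.' then ' ' :: aMark t cnt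
    else c :: aMark t 0

-- `if len(answer) > 0 and answer[0] == '.': answer.remove(answer[0])`
-- (the guard says answer[0] exists and is '.'; remove deletes its first occurrence, so getD never fires)
def aRemoveHeadDot (l : List Char) : List Char :=
  if PySem.List.pyGet? l 0 = some '.' then (PySem.List.remove? l '.').getD l else l

-- `if len(answer) > 0 and answer[-1] == '.': answer = answer[:-1]`  (answer[:-1] = dropLast; exact here)
def aDropTrailDot (l : List Char) : List Char :=
  if PySem.List.pyGet? l (-1) = some '.' then l.dropLast else l

-- step 7 while loop; `answer[-1]` would raise IndexError on [], which A never reaches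
def aPad (l : List Char) : List Char :=
  if _h : l.length < 3 then
    match l.getLast? with
    | none => l
    | some c => aPad (l ++ [c])
  else l
termination_by 3 - l.length
decreasing_by simp [List.length_append]; omega

def solution (new_id : String) : String :=
  let s := PySem.Chars.lower new_id.toList                                     -- step 1
  let ans := s.foldl (fun acc c => if aKeep c then acc ++ [c] else acc) []     -- step 2
  let ans := aMark ans 0                                                       -- step 3
  let ans := aDropTrailDot (aRemoveHeadDot ans)                                -- step 4
  let ans := ans.filter (· != ' ')                                             -- .replace(" ", "")
  let ans := if ans = [] then ['a'] else ans                                   -- step 5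
  let ans := if 16 ≤ ans.length then ans.take 15 else ans                      -- step 6: answer[:15]
  let ans := aDropTrailDot ans
  let ans := if ans.length ≤ 2 then aPad ans else ans                          -- step 7
  String.ofList ans

-- ===== PORT B =====
-- re.sub(r'[^a-z0-9\-_.]', '', s): the kept character class
def bAllowed (c : Char) : Bool :=
  ('a' ≤ c && c ≤ 'z') || ('0' ≤ c && c ≤ '9') || c == '-' || c == '_' || c == '.'

-- re.sub(r'\.+', '.', s): collapse every run of dots to one dot
def bCollapse : List Char → List Char
  | [] => []
  | [c] => [c]
  | a :: b :: t => if a == '.' && b == '.' then bCollapse (b :: t) else a :: bCollapse (b :: t)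

-- re.sub(r'^\.|\.$', '', s): one leading and one trailing dot (runs are already collapsed)
def bStripLead (l : List Char) : List Char := if l.head? = some '.' then l.tail else l
def bStripTrail (l : List Char) : List Char := if l.getLast? = some '.' then l.dropLast else l

-- `if len(s) < 3: s = s + s[-1] * (3 - len(s))`; `s[-1]` would raise on [], which B never reaches
def bPad (l : List Char) : List Char :=
  if l.length < 3 then
    match l.getLast? with
    | none => l
    | some c => l ++ List.replicate (3 - l.length) c
  else l

def solution_alt (new_id : String) : String :=
  let s := PySem.Chars.lower new_id.toList
  let s := s.filter bAllowed
  let s := bStripTrail (bStripLead (bCollapse s))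
  let s := if s = [] then ['a'] else s
  let s := s.take 15
  let s := if PySem.List.pyGet? s (-1) = some '.' then s.dropLast else s
  let s := bPad s
  String.ofList s

-- ===== PRECONDITION & SPEC =====
def Spec_solution (new_id : String) (out : String) : Prop := out = solution_alt new_id
instance (new_id : String) (out : String) : Decidable (Spec_solution new_id out) := by unfold Spec_solution; infer_instance

-- ===== CLAIM (what is proved, stated in full; the proofs are below) =====
def Claim_equal_solution : Prop := ∀ (new_id : String), Dom_solution new_id → Spec_solution new_id (solution new_id)

-- ===== LEMMAS AND PROOFS =====

lemma adt_eq (l : List Char) : aDropTrailDot l = bStripTrail l := by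
  simp [aDropTrailDot, bStripTrail, PySem.List.pyGet?_neg_one]

lemma char_le_iff (a b : Char) : (a ≤ b) ↔ a.toNat ≤ b.toNat := by
  rw [Char.le_def]; exact UInt32.le_iff_toNat_le

lemma isupper_lower (c : Char) : PySem.Chars.isupper (PySem.Chars.lowerChar c) = false := by
  simp only [PySem.Chars.lowerChar]
  split_ifs with h
  · have hc : 65 ≤ c.toNat ∧ c.toNat ≤ 90 := by
      simpa [PySem.Chars.isupper, char_le_iff] using h
    have hv : (c.toNat + 32).isValidChar := by
      left; omega
    have ht : (Char.ofNat (c.toNat + 32)).toNat = c.toNat + 32 := by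
      simp [Char.ofNat, hv]
    simp only [PySem.Chars.isupper, char_le_iff, ht]
    simp only [Bool.and_eq_false_iff, decide_eq_false_iff_not]
    right
    have hz : ('Z').toNat = 90 := rfl
    omega
  · simpa using h

lemma keep_lower (c : Char) : aKeep (PySem.Chars.lowerChar c) = bAllowed (PySem.Chars.lowerChar c) := by
  have h := isupper_lower c
  simp [aKeep, bAllowed, PySem.Chars.isalnum, PySem.Chars.isalpha, PySem.Chars.isdigit,
    PySem.Chars.islower, h, Bool.or_assoc]

lemma bStripTrail_cons (c : Char) (l : List Char) (h : l ≠ []) :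
    bStripTrail (c :: l) = c :: bStripTrail l := by
  rcases l with _ | ⟨x, r⟩
  · exact absurd rfl h
  · simp only [bStripTrail, List.getLast?_cons_cons, List.dropLast_cons₂]
    split_ifs <;> rfl

lemma bStripTrail_eq_nil {l : List Char} (h : bStripTrail l = []) : l = [] ∨ l = ['.'] := by
  rcases l with _ | ⟨x, r⟩
  · exact Or.inl rfl
  rcases r with _ | ⟨y, q⟩
  · by_cases hx : x = '.'
    · right; rw [hx]
    · exfalso; revert h; simp [bStripTrail, hx]
  · exfalso; revert h
    simp only [bStripTrail, List.getLast?_cons_cons, List.dropLast_cons₂]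
    split_ifs <;> simp

lemma bCollapse_cons_ne {c : Char} (hc : c ≠ '.') (t : List Char) :
    bCollapse (c :: t) = c :: bCollapse t := by
  rcases t with _ | ⟨b, r⟩
  · rfl
  · simp [bCollapse, hc]

lemma bCollapse_cons_dot (t : List Char) :
    bCollapse ('.' :: t) = '.' :: bCollapse (t.dropWhile (· == '.')) := by
  induction t with
  | nil => rfl
  | cons b r ih =>
    by_cases hb : b = '.'
    · subst hb
      rw [show bCollapse ('.' :: '.' :: r) = bCollapse ('.' :: r) from by simp [bCollapse]]
      rw [ih]
      simp
    · rw [show bCollapse ('.' :: b :: r) = '.' :: bCollapse (b :: r) from by simp [bCollapse, hb]]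
      simp [hb]

lemma bCollapse_ne_nil {t : List Char} (h : t ≠ []) : bCollapse t ≠ [] := by
  rcases t with _ | ⟨c, r⟩
  · exact absurd rfl h
  clear h
  induction r generalizing c with
  | nil => simp [bCollapse]
  | cons b q ih =>
    by_cases hd : (c == '.' && b == '.') = true
    · simpa [bCollapse, hd] using ih b
    · simp [bCollapse, hd]

lemma bCollapse_head (c : Char) (t : List Char) : (bCollapse (c :: t)).head? = some c := by
  induction t generalizing c with
  | nil => rfl
  | cons b r ih =>
    by_cases hd : (c == '.' && b == '.') = true
    · have hc : c = '.' := by simp at hd; exact hd.1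
      have hb : b = '.' := by simp at hd; exact hd.2
      rw [show bCollapse (c :: b :: r) = bCollapse (b :: r) from by simp [bCollapse, hd]]
      rw [ih b, hb, hc]
    · simp [bCollapse, hd]

theorem lastNotDot : (u : List Char) → (bStripTrail (bCollapse u)).getLast? ≠ some '.'
  | [] => by simp [bCollapse, bStripTrail]
  | [c] => by by_cases hc : c = '.' <;> simp [bCollapse, bStripTrail, hc]
  | a :: b :: t => by
    have ih := lastNotDot (b :: t)
    by_cases hd : (a == '.' && b == '.') = true
    · rw [show bCollapse (a :: b :: t) = bCollapse (b :: t) from by simp [bCollapse, hd]]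
      exact ih
    · rw [show bCollapse (a :: b :: t) = a :: bCollapse (b :: t) from by simp [bCollapse, hd]]
      have hLne : bCollapse (b :: t) ≠ [] := bCollapse_ne_nil (by simp)
      rw [bStripTrail_cons a _ hLne]
      by_cases hz : bStripTrail (bCollapse (b :: t)) = []
      · rcases bStripTrail_eq_nil hz with h | h
        · exact absurd h hLne
        · have hb : b = '.' := by
            have h1 := bCollapse_head b t
            rw [h] at h1; simpa using h1.symm
          have ha : a ≠ '.' := by
            intro ha; rw [ha, hb] at hd; simp at hd
          rw [hz]; simpa using ha
      · have hgl : (a :: bStripTrail (bCollapse (b :: t))).getLast? =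
            (bStripTrail (bCollapse (b :: t))).getLast? := by
          rcases hq : bStripTrail (bCollapse (b :: t)) with _ | ⟨y, q⟩
          · exact absurd hq hz
          · exact List.getLast?_cons_cons
        rw [hgl]; exact ih

lemma aMark_ne_nil (x : Char) (r : List Char) (k : Nat) : aMark (x :: r) k ≠ [] := by
  simp only [aMark]; split_ifs <;> simp

lemma allSpaces {t : List Char} (h : ∀ x ∈ t, x = '.') {k : Nat} (hk : k ≠ 0) :
    aMark t k = List.replicate t.length ' ' := by
  induction t with
  | nil => simp [aMark]
  | cons x r ih =>
    have hx : x = '.' := h x (List.mem_cons_self ..)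
    rw [show aMark (x :: r) k = ' ' :: aMark r k from by simp [aMark, hx, hk]]
    rw [ih (fun y hy => h y (List.mem_cons_of_mem _ hy))]
    simp [List.replicate_succ]

lemma spacesOut {l : List Char} (h : ∀ x ∈ l, x = ' ') :
    (bStripTrail l).filter (· != ' ') = [] := by
  have h2 : ∀ x ∈ bStripTrail l, x = ' ' := by
    intro x hx
    apply h
    unfold bStripTrail at hx
    split_ifs at hx
    · exact (List.dropLast_sublist l).mem hx
    · exact hx
  rw [List.filter_eq_nil_iff.mpr]
  intro a ha
  simp [h2 a ha]

lemma dropWhile_head_ne (t : List Char) (y : Char) (q : List Char)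
    (h : t.dropWhile (· == '.') = y :: q) : y ≠ '.' := by
  have := List.head?_dropWhile_not (· == '.') t
  rw [h] at this
  simpa using this

lemma G (xs : List Char) (hs : ' ' ∉ xs) : ∀ (cnt : Nat),
    (bStripTrail (aMark xs cnt)).filter (· != ' ') =
        bStripTrail (bCollapse (if cnt = 0 then xs else xs.dropWhile (· == '.'))) ∨
    (bStripTrail (aMark xs cnt)).filter (· != ' ') =
        bStripTrail (bCollapse (if cnt = 0 then xs else xs.dropWhile (· == '.'))) ++ ['.'] := by
  induction xs with
  | nil =>
    intro cnt; left
    simp [aMark, bCollapse, bStripTrail]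
  | cons c t ih =>
    intro cnt
    have hs' : ' ' ∉ t := fun h => hs (List.mem_cons_of_mem _ h)
    have hc' : c ≠ ' ' := fun h => hs (h ▸ List.mem_cons_self ..)
    have H0 : (bStripTrail (aMark (c :: t) 0)).filter (· != ' ') =
          bStripTrail (bCollapse (c :: t)) ∨
        (bStripTrail (aMark (c :: t) 0)).filter (· != ' ') =
          bStripTrail (bCollapse (c :: t)) ++ ['.'] := by
      by_cases hc : c = '.'
      · subst hc
        rw [show aMark ('.' :: t) 0 = '.' :: aMark t 1 from by simp [aMark]]
        rw [bCollapse_cons_dot]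
        rcases t with _ | ⟨x, r⟩
        · left; decide
        · have hm : aMark (x :: r) 1 ≠ [] := aMark_ne_nil x r 1
          rw [bStripTrail_cons _ _ hm, List.filter_cons_of_pos (by decide)]
          by_cases hun : (x :: r).dropWhile (· == '.') = []
          · have hall : ∀ y ∈ x :: r, y = '.' := by
              intro y hy
              have := List.dropWhile_eq_nil_iff.mp hun y hy
              simpa using this
            right
            rw [hun]
            rw [allSpaces hall (by omega)]
            rw [spacesOut (fun z hz => List.eq_of_mem_replicate hz)]
            decide
          · have hcu : bCollapse ((x :: r).dropWhile (· == '.')) ≠ [] := bCollapse_ne_nil hun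
            rw [bStripTrail_cons _ _ hcu]
            have hI := ih hs' 1
            rw [if_neg (by omega)] at hI
            rcases hI with h | h
            · left; rw [h]
            · right; rw [h]; rfl
      · rw [show aMark (c :: t) 0 = c :: aMark t 0 from by simp [aMark, hc]]
        rw [bCollapse_cons_ne hc]
        rcases t with _ | ⟨x, r⟩
        · left
          simp [aMark, bCollapse, bStripTrail, hc, hc']
        · have hm := aMark_ne_nil x r 0
          rw [bStripTrail_cons _ _ hm, List.filter_cons_of_pos (by simp [hc'])]
          have hcb : bCollapse (x :: r) ≠ [] := bCollapse_ne_nil (by simp)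
          rw [bStripTrail_cons _ _ hcb]
          have hI := ih hs' 0
          rw [if_pos rfl] at hI
          rcases hI with h | h
          · left; rw [h]
          · right; rw [h]; rfl
    by_cases h0 : cnt = 0
    · subst h0; simpa using H0
    · rw [if_neg h0]
      by_cases hc : c = '.'
      · subst hc
        rw [show aMark ('.' :: t) cnt = ' ' :: aMark t cnt from by simp [aMark, h0]]
        rw [show ('.' :: t).dropWhile (· == '.') = t.dropWhile (· == '.') from by
          simp]
        rcases t with _ | ⟨x, r⟩
        · left; simp [aMark, bCollapse, bStripTrail]
        · have hm := aMark_ne_nil x r cnt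
          rw [bStripTrail_cons _ _ hm, List.filter_cons_of_neg (by simp)]
          have hI := ih hs' cnt
          rw [if_neg h0] at hI
          exact hI
      · rw [show aMark (c :: t) cnt = c :: aMark t 0 from by simp [aMark, hc]]
        rw [show (c :: t).dropWhile (· == '.') = c :: t from by simp [hc]]
        rw [show aMark (c :: t) 0 = c :: aMark t 0 from by simp [aMark, hc]] at H0
        exact H0

lemma mid (xs : List Char) (hs : ' ' ∉ xs) :
    (aDropTrailDot (aRemoveHeadDot (aMark xs 0))).filter (· != ' ') =
        bStripTrail (bStripLead (bCollapse xs)) ∨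
    (bStripTrail (bStripLead (bCollapse xs)) ≠ [] ∧
     (bStripTrail (bStripLead (bCollapse xs))).getLast? ≠ some '.' ∧
     (aDropTrailDot (aRemoveHeadDot (aMark xs 0))).filter (· != ' ') =
        bStripTrail (bStripLead (bCollapse xs)) ++ ['.']) := by
  rcases xs with _ | ⟨c, t⟩
  · left; decide
  have hs' : ' ' ∉ t := fun h => hs (List.mem_cons_of_mem _ h)
  by_cases hc : c = '.'
  · subst hc
    rw [show aMark ('.' :: t) 0 = '.' :: aMark t 1 from by simp [aMark]]
    rw [show aRemoveHeadDot ('.' :: aMark t 1) = aMark t 1 from by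
      simp [aRemoveHeadDot, PySem.List.remove?, List.idxOf?_cons]]
    rw [adt_eq]
    rw [show bStripLead (bCollapse ('.' :: t)) = bCollapse (t.dropWhile (· == '.')) from by
      rw [bCollapse_cons_dot]; simp [bStripLead]]
    have hG := G t hs' 1
    rw [if_neg (by omega)] at hG
    rcases hG with h | h
    · left; exact h
    · right
      refine ⟨?_, lastNotDot _, h⟩
      intro hB
      rcases bStripTrail_eq_nil hB with hC | hC
      · have hun : t.dropWhile (· == '.') = [] := by
          by_contra hne; exact (bCollapse_ne_nil hne) hC
        have hall : ∀ y ∈ t, y = '.' := by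
          intro y hy
          have := List.dropWhile_eq_nil_iff.mp hun y hy
          simpa using this
        rw [allSpaces hall (by omega), spacesOut (fun z hz => List.eq_of_mem_replicate hz)] at h
        rw [hB] at h
        simp at h
      · rcases hu : t.dropWhile (· == '.') with _ | ⟨y, q⟩
        · rw [hu] at hC; simp [bCollapse] at hC
        · have h1 := bCollapse_head y q
          rw [hu] at hC; rw [hC] at h1
          have hy : y = '.' := by simpa using h1.symm
          exact dropWhile_head_ne t y q hu hy
  · rw [show aRemoveHeadDot (aMark (c :: t) 0) = aMark (c :: t) 0 from by
      rw [show aMark (c :: t) 0 = c :: aMark t 0 from by simp [aMark, hc]]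
      simp [aRemoveHeadDot, hc]]
    rw [adt_eq]
    rw [show bStripLead (bCollapse (c :: t)) = bCollapse (c :: t) from by
      rw [bCollapse_cons_ne hc]; simp [bStripLead, hc]]
    have hG := G (c :: t) hs 0
    rw [if_pos rfl] at hG
    rcases hG with h | h
    · left; exact h
    · right
      refine ⟨?_, lastNotDot _, h⟩
      intro hB
      rcases bStripTrail_eq_nil hB with hC | hC
      · exact bCollapse_ne_nil (by simp) hC
      · have h1 := bCollapse_head c t
        rw [hC] at h1
        exact hc (by simpa using h1.symm)

def finA (m : List Char) : List Char :=
  let a := if m = [] then ['a'] else m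
  let a := if 16 ≤ a.length then a.take 15 else a
  let a := aDropTrailDot a
  if a.length ≤ 2 then aPad a else a

def finB (m : List Char) : List Char :=
  let s := if m = [] then ['a'] else m
  let s := s.take 15
  let s := if PySem.List.pyGet? s (-1) = some '.' then s.dropLast else s
  bPad s

lemma pad_eq (l : List Char) : (if l.length ≤ 2 then aPad l else l) = bPad l := by
  by_cases hl : l.length ≤ 2
  · rw [if_pos hl]
    rcases l with _ | ⟨a, l⟩
    · rw [aPad.eq_def]; simp [bPad]
    rcases l with _ | ⟨b, l⟩
    · rw [aPad.eq_def]; simp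
      rw [aPad.eq_def]; simp
      rw [aPad.eq_def]; simp [bPad, List.replicate]
    rcases l with _ | ⟨c, l⟩
    · rw [aPad.eq_def]; simp
      rw [aPad.eq_def]; simp [bPad]
    · simp at hl
  · rw [if_neg hl]
    rw [show bPad l = l from by simp [bPad]; omega]

lemma trunc_eq (l : List Char) : (if 16 ≤ l.length then l.take 15 else l) = l.take 15 := by
  split_ifs with h
  · rfl
  · rw [List.take_of_length_le (by omega)]

lemma fin_eq (m : List Char) : finA m = finB m := by
  simp only [finA, finB, trunc_eq]
  rw [show aDropTrailDot ((if m = [] then ['a'] else m).take 15) =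
      (if PySem.List.pyGet? ((if m = [] then ['a'] else m).take 15) (-1) = some '.'
        then ((if m = [] then ['a'] else m).take 15).dropLast
        else (if m = [] then ['a'] else m).take 15) from rfl]
  exact pad_eq _

lemma fin_plusdot (b : List Char) (hb : b ≠ []) (hl : b.getLast? ≠ some '.') :
    finA (b ++ ['.']) = finB b := by
  have hne : b ++ ['.'] ≠ [] := by simp
  simp only [finA, finB, if_neg hne, if_neg hb]
  by_cases h15 : 15 ≤ b.length
  · have h16 : 16 ≤ (b ++ ['.']).length := by simp; omega
    rw [if_pos h16, List.take_append_of_le_length (by omega)]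
    rw [show aDropTrailDot (b.take 15) =
        (if PySem.List.pyGet? (b.take 15) (-1) = some '.' then (b.take 15).dropLast
          else b.take 15) from rfl]
    exact pad_eq _
  · have h16 : ¬ 16 ≤ (b ++ ['.']).length := by simp; omega
    rw [if_neg h16]
    rw [show aDropTrailDot (b ++ ['.']) = b from by
      simp [aDropTrailDot, PySem.List.pyGet?_neg_one]]
    rw [List.take_of_length_le (by omega)]
    rw [show (if PySem.List.pyGet? b (-1) = some '.' then b.dropLast else b) = b from by
      rw [PySem.List.pyGet?_neg_one, if_neg hl]]
    exact pad_eq b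

-- ===== VERDICT (by name: the statement is the Claim_ definition above) =====
theorem solution_spec : Claim_equal_solution := by
  intro new_id _
  unfold Spec_solution
  show String.ofList (finA ((aDropTrailDot (aRemoveHeadDot (aMark
      ((PySem.Chars.lower new_id.toList).foldl (fun acc c => if aKeep c then acc ++ [c] else acc) []) 0))).filter (· != ' ')))
    = String.ofList (finB (bStripTrail (bStripLead (bCollapse ((PySem.Chars.lower new_id.toList).filter bAllowed)))))
  have hfold : (PySem.Chars.lower new_id.toList).foldl
      (fun acc c => if aKeep c then acc ++ [c] else acc) [] =
      (PySem.Chars.lower new_id.toList).filter bAllowed := by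
    have h := PySem.List.foldl_append_if aKeep id (PySem.Chars.lower new_id.toList) []
    simp only [id] at h
    rw [h]
    simp only [List.nil_append, List.map_id]
    apply List.filter_congr
    intro x hx
    simp only [PySem.Chars.lower, List.mem_map] at hx
    obtain ⟨c, -, rfl⟩ := hx
    exact keep_lower c
  rw [hfold]
  have hs : ' ' ∉ (PySem.Chars.lower new_id.toList).filter bAllowed := by
    intro h
    have := (List.mem_filter.mp h).2
    simp [bAllowed] at this
  rcases mid _ hs with h | ⟨hne, hl, h⟩
  · rw [h, fin_eq]
  · rw [h, fin_plusdot _ hne hl]
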